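-- pv_equiv track=rewrite | github.com/denmcca/crypto-columnar-transpose-shift | cryptos.py | get_order_from_key
-- ===== SOURCE A (Python) =====
-- def get_order_from_key(key):
--     # Get key element order
--     key = list(key)
--     order = {i: k for i, k in enumerate(sorted(key))}
--     ordered_index = []
--     for c in key:
--         for e in order:
--             if order[e] == c:
--                 ordered_index.append(e)
--                 break
--         order.pop(e)
--     return ordered_index
-- ===== SOURCE B (Python) =====
-- def get_order_from_key(key):
--     # One pass over sorted(key) builds, per character, the queue of its ranks;
--     # then each key character pops its next rank from the front of its queue.
--     queues = {}
--     for rank, ch in enumerate(sorted(key)):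
--         queues.setdefault(ch, []).append(rank)
--     return [queues[c].pop(0) for c in key]
-- ===== Notes on version B (the rewrite author's own statement) =====
-- stated objective: faster
-- what changed: A rescans the whole remaining rank->char dict for every key character; B builds a char->queue-of-ranks index in one pass over sorted(key) and pops the front of the matching queue per character, removing the inner scan.
import Mathlib
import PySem

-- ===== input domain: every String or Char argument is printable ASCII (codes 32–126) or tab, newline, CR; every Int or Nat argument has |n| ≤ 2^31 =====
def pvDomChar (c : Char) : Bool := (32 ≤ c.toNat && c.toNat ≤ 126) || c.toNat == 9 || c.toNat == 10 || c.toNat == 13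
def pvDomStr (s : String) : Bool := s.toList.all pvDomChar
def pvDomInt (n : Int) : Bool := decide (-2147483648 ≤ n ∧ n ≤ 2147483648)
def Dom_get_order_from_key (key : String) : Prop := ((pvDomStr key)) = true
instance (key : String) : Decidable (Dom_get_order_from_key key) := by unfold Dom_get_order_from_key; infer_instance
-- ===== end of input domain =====

-- B replaces A's per-character scan of the remaining rank->char dict by a
-- char->queue-of-ranks index built once from sorted(key) (objective: faster).

-- ===== PORT A =====
def get_order_from_key (key : String) : List Int :=
  -- key = list(key); order = {i: k for i, k in enumerate(sorted(key))}
  let keyL := key.toList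
  let order : PySem.Dict Int Char :=
    (PySem.List.enumerate (PySem.List.sorted keyL (fun c => c))).foldl
      (fun d p => d.insert p.1 p.2) PySem.Dict.empty
  -- for c in key: scan dict keys in insertion order for first e with order[e] == c
  (keyL.foldl (fun (st : PySem.Dict Int Char × List Int) c =>
      match st.1.items.find? (fun p => p.2 == c) with
      | some p => (st.1.erase p.1, st.2 ++ [p.1])   -- append e; order.pop(e)
      | none =>
        -- no break: e is the last key iterated; order.pop(e) (unreachable in fact)
        match st.1.items.getLast? with
        | some p => (st.1.erase p.1, st.2)
        | none => st) (order, [])).2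

-- ===== PORT B =====
def get_order_from_key_alt (key : String) : List Int :=
  -- queues[ch].append(rank) for rank, ch in enumerate(sorted(key))
  let queues : PySem.Dict Char (List Int) :=
    (PySem.List.enumerate (PySem.List.sorted key.toList (fun c => c))).foldl
      (fun d p => d.modify p.2 [] (fun l => l ++ [p.1])) PySem.Dict.empty
  -- [queues[c].pop(0) for c in key]
  (key.toList.foldl (fun (st : PySem.Dict Char (List Int) × List Int) c =>
      match st.1.get? c with
      | some (h :: t) => (st.1.insert c t, st.2 ++ [h])
      | _ => st) (queues, [])).2  -- Python would raise here; unreachable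

-- ===== PRECONDITION & SPEC =====
def Spec_get_order_from_key (key : String) (out : List Int) : Prop := out = get_order_from_key_alt key
instance (key : String) (out : List Int) : Decidable (Spec_get_order_from_key key out) := by unfold Spec_get_order_from_key; infer_instance

-- ===== CLAIM (what is proved, stated in full; the proofs are below) =====
def Claim_equal_get_order_from_key : Prop := ∀ (key : String), Dom_get_order_from_key key → Spec_get_order_from_key key (get_order_from_key key)

-- ===== LEMMAS AND PROOFS =====

theorem pv_find?_eq_head?_filter {α : Type} (p : α → Bool) (l : List α) :
    l.find? p = (l.filter p).head? := by
  induction l with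
  | nil => rfl
  | cons x xs ih =>
    by_cases h : p x = true
    · rw [List.find?_cons_of_pos h, List.filter_cons_of_pos h, List.head?_cons]
    · rw [List.find?_cons_of_neg h, List.filter_cons_of_neg h, ih]

-- building A's dict from enumerate(sorted key) yields exactly that list of items
theorem pv_foldl_insert_fresh {κ ν : Type} [BEq κ] [LawfulBEq κ]
    (l : List (κ × ν)) : ∀ (d : PySem.Dict κ ν),
    (∀ p ∈ l, d.contains p.1 = false) → (l.map Prod.fst).Nodup →
    ((l.foldl (fun d p => d.insert p.1 p.2) d).items = d.items ++ l) := by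
  induction l with
  | nil => intro d _ _; simp
  | cons p l ih =>
    intro d hfresh hnd
    have hc : d.contains p.1 = false := hfresh p (by simp)
    have hins : (d.insert p.1 p.2).items = d.items ++ [(p.1, p.2)] := by
      have hnot : ¬ d.contains p.1 = true := by simp [hc]
      simp only [PySem.Dict.insert, if_neg hnot]
    simp only [List.foldl_cons]
    rw [ih (d.insert p.1 p.2) ?_ (by simpa using hnd.of_cons), hins]
    · simp
    · intro q hq
      have hqd : d.contains q.1 = false := hfresh q (by simp [hq])
      have hne : q.1 ≠ p.1 := by
        simp only [List.map_cons, List.nodup_cons] at hnd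
        intro he
        exact hnd.1 (he ▸ (List.mem_map_of_mem hq))
      simp only [PySem.Dict.contains, hins, List.any_append, List.any_cons,
        List.any_nil, Bool.or_false]
      simp only [PySem.Dict.contains] at hqd
      rw [hqd]
      simpa using fun he => hne he.symm
-- value of B's queues dict after the building fold
theorem pv_queues_getD (c : Char) :
    ∀ (l : List (Int × Char)) (d : PySem.Dict Char (List Int)),
    ((l.foldl (fun d p => d.modify p.2 [] (fun t => t ++ [p.1])) d).getD c []) =
      d.getD c [] ++ (l.filter (fun p => p.2 == c)).map Prod.fst := by
  intro l
  induction l with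
  | nil => intro d; simp
  | cons p l ih =>
    intro d
    simp only [List.foldl_cons]
    rw [ih]
    by_cases h : p.2 = c
    · subst h
      rw [PySem.Dict.getD_modify_self]
      simp
    · rw [PySem.Dict.getD_modify_of_ne _ [] _ (fun he => h he.symm)]
      simp [h]

-- get? from getD when the value is nonempty
theorem pv_get?_of_getD_ne {κ : Type} [BEq κ] [LawfulBEq κ]
    (d : PySem.Dict κ (List Int)) (k : κ) (h : d.getD k [] ≠ []) :
    d.get? k = some (d.getD k []) := by
  cases hg : d.get? k with
  | none => exact absurd (by simp [PySem.Dict.getD_eq_get?_getD, hg]) h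
  | some v => simp [PySem.Dict.getD_eq_get?_getD, hg]

-- the main loop invariant: A's fold over the remaining dict and B's fold over
-- the queues produce the same appended output
theorem pv_main (cs : List Char) :
    ∀ (d : PySem.Dict Int Char) (q : PySem.Dict Char (List Int)) (acc : List Int),
    (d.items.map Prod.fst).Nodup →
    (∀ c, q.getD c [] = (d.items.filter (fun p => p.2 == c)).map Prod.fst) →
    (∀ c, cs.count c ≤ (d.items.filter (fun p => p.2 == c)).length) →
    (cs.foldl (fun (st : PySem.Dict Int Char × List Int) c =>
        match st.1.items.find? (fun p => p.2 == c) with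
        | some p => (st.1.erase p.1, st.2 ++ [p.1])
        | none =>
          match st.1.items.getLast? with
          | some p => (st.1.erase p.1, st.2)
          | none => st) (d, acc)).2 =
    (cs.foldl (fun (st : PySem.Dict Char (List Int) × List Int) c =>
        match st.1.get? c with
        | some (h :: t) => (st.1.insert c t, st.2 ++ [h])
        | _ => st) (q, acc)).2 := by
  induction cs with
  | nil => intro d q acc _ _ _; rfl
  | cons c cs ih =>
    intro d q acc hn hq hm
    have hm_c := hm c
    rw [List.count_cons_self] at hm_c
    cases hF : d.items.filter (fun p => p.2 == c) with
    | nil => rw [hF] at hm_c; simp at hm_c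
    | cons p F' =>
    have hfind : d.items.find? (fun p => p.2 == c) = some p := by
      rw [pv_find?_eq_head?_filter, hF]; rfl
    have hgd : q.getD c [] = p.1 :: F'.map Prod.fst := by
      rw [hq c, hF]; rfl
    have hqc : q.get? c = some (p.1 :: F'.map Prod.fst) := by
      rw [← hgd]
      exact pv_get?_of_getD_ne q c (by rw [hgd]; simp)
    -- facts about the chosen entry p
    have hpmem : p ∈ d.items := List.mem_of_mem_filter (by rw [hF]; exact List.mem_cons_self)
    have hpval : p.2 = c := by
      have := List.of_mem_filter (l := d.items) (by rw [hF]; exact List.mem_cons_self)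
      simpa using this
    have hFsub : (p :: F').Sublist d.items := hF ▸ d.items.filter_sublist
    have hFkeys : ((p :: F').map Prod.fst).Nodup := hn.sublist (hFsub.map Prod.fst)
    have hpF' : p.1 ∉ F'.map Prod.fst := by
      simpa using (List.nodup_cons.mp hFkeys).1
    -- how erasing p's key changes the per-character filters
    have hfilt : ∀ x, (d.erase p.1).items.filter (fun r => r.2 == x) =
        if x = c then F' else d.items.filter (fun r => r.2 == x) := by
      intro x
      have hcomm : (d.erase p.1).items.filter (fun r => r.2 == x) =
          (d.items.filter (fun r => r.2 == x)).filter (fun r => !(r.1 == p.1)) := by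
        show (d.items.filter (fun r => !(r.1 == p.1))).filter (fun r => r.2 == x) = _
        rw [List.filter_filter, List.filter_filter]
        exact List.filter_congr (fun r _ => Bool.and_comm _ _)
      by_cases hx : x = c
      · subst hx
        rw [hcomm, hF, if_pos rfl, List.filter_cons]
        simp only [BEq.rfl, Bool.not_true, if_neg (by simp : ¬ (false = true))]
        apply List.filter_eq_self.mpr
        intro r hr
        simp only [Bool.not_eq_true', beq_eq_false_iff_ne, ne_eq]
        intro he
        exact hpF' (he ▸ List.mem_map_of_mem hr)
      · rw [hcomm, if_neg hx]
        apply List.filter_eq_self.mpr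
        intro r hr
        have hrmem : r ∈ d.items := List.mem_of_mem_filter hr
        have hrval : (r.2 == x) = true := (List.mem_filter.mp hr).2
        simp only [Bool.not_eq_true', beq_eq_false_iff_ne, ne_eq]
        intro he
        have : r = p := List.inj_on_of_nodup_map hn hrmem hpmem he
        exact hx (by rw [← eq_of_beq hrval, this]; exact hpval)
    -- one step of both folds
    simp only [List.foldl_cons, hfind, hqc]
    -- apply the induction hypothesis to the new states
    apply ih
    · exact hn.sublist ((d.items.filter_sublist).map Prod.fst)
    · intro x
      rw [PySem.Dict.getD_insert, hfilt x]
      by_cases hx : x = c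
      · rw [if_pos hx, if_pos hx]
      · rw [if_neg hx, if_neg hx, hq x]
    · intro x
      rw [hfilt x]
      by_cases hx : x = c
      · subst hx
        rw [if_pos rfl]
        have : (p :: F').length = F'.length + 1 := rfl
        rw [hF, this] at hm_c
        omega
      · rw [if_neg hx, ← List.count_cons_of_ne (fun h => hx h.symm)]
        exact hm x

-- ===== VERDICT (by name: the statement is the Claim_ definition above) =====
theorem get_order_from_key_spec : Claim_equal_get_order_from_key := by
  unfold Claim_equal_get_order_from_key Spec_get_order_from_key
  intro key _
  simp only [get_order_from_key, get_order_from_key_alt]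
  have hE : ((PySem.List.enumerate (PySem.List.sorted key.toList (fun c => c))).map
      Prod.fst).Nodup := by
    have hpw := PySem.List.pairwise_lt_enumerate (PySem.List.sorted key.toList (fun c => c)) 0
    exact ((List.pairwise_map).mpr hpw).imp (fun h => ne_of_lt h)
  have hitems : ((PySem.List.enumerate (PySem.List.sorted key.toList (fun c => c))).foldl
      (fun d p => d.insert p.1 p.2) PySem.Dict.empty).items =
      PySem.List.enumerate (PySem.List.sorted key.toList (fun c => c)) := by
    rw [pv_foldl_insert_fresh _ PySem.Dict.empty
      (fun p _ => PySem.Dict.contains_empty p.1) hE]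
    rfl
  apply pv_main
  · rw [hitems]; exact hE
  · intro x
    rw [pv_queues_getD, hitems, PySem.Dict.getD_empty]
    rfl
  · intro x
    rw [hitems]
    have hlen : ((PySem.List.enumerate (PySem.List.sorted key.toList (fun c => c))).filter
        (fun p => p.2 == x)).length = (PySem.List.sorted key.toList (fun c => c)).count x := by
      rw [← List.countP_eq_length_filter]
      have h2 : List.countP (fun a => a == x) (PySem.List.sorted key.toList (fun c => c)) =
          List.countP (fun p : Int × Char => p.2 == x)
            (PySem.List.enumerate (PySem.List.sorted key.toList (fun c => c))) := by
        conv_lhs => rw [← PySem.List.map_snd_enumerate (PySem.List.sorted key.toList (fun c => c)) 0]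
        rw [List.countP_map]
        rfl
      rw [← h2]
      rfl
    rw [hlen, List.Perm.count_eq (PySem.List.sorted_perm key.toList (fun c => c) false)]
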